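-- pv_equiv track=rewrite | github.com/Zerohertz/Algorithm | BOJ/Silver/1966/main.py | printer
-- ===== SOURCE A (Python) =====
-- def printer(l):
--     dupl = [i for i in l]
--     dupl.sort(key=lambda x: x[0])
--     M = dupl[-1][0]
--     m = dupl[0][0]
--     if l[0] == M or M == m:
--         return l
--     while M != l[0][0]:
--         l.append(l[0])
--         del l[0]
--     return l
-- ===== SOURCE B (Python) =====
-- def printer(l):
--     heads = [x[0] for x in l]
--     M = max(heads)
--     i = heads.index(M)
--     return l[i:] + l[:i]
-- ===== Notes on version B (the rewrite author's own statement) =====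
-- stated objective: simpler
-- what changed: Replaces the sorted copy (used only to read off the max and min priority) and the one-element-at-a-time rotation loop by a list of the priorities, max(), index() and a single slice-and-concatenate.
import Mathlib
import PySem

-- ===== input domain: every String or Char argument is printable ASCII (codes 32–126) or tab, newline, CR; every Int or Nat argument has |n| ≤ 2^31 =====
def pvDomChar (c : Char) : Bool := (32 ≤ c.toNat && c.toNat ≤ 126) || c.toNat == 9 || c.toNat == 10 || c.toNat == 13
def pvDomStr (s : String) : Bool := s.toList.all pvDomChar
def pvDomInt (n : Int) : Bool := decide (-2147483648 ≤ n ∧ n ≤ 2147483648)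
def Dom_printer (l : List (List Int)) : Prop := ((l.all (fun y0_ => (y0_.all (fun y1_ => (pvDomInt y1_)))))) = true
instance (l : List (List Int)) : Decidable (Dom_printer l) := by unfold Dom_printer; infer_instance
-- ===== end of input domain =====

-- B replaces A's sort + one-element-at-a-time rotation loop by a heads list, max, index and one slice;
-- A mutates its argument in place (B does not): the equivalence proved here is about the RETURN value only.

-- x[0] of an inner list (Python raises on an empty inner list; Pre_ excludes that)
def pvKey (x : List Int) : Int := PySem.List.pyGetD x 0 0

-- ===== PORT A =====
-- the while loop: 'while M != l[0][0]: l.append(l[0]); del l[0]'; fuel = len l suffices under Pre_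
def printerRot (M : Int) : Nat → List (List Int) → List (List Int)
  | 0, l => l
  | fuel+1, l =>
    if M ≠ pvKey (PySem.List.pyGetD l 0 []) then
      printerRot M fuel (l.tail ++ [l.headD []])
    else l

def printer (l : List (List Int)) : List (List Int) :=
  let dupl := PySem.List.sorted l (fun x => pvKey x)
  let M := pvKey (PySem.List.pyGetD dupl (-1) [])
  let m := pvKey (PySem.List.pyGetD dupl 0 [])
  -- Python's 'l[0] == M' compares a list with an int: always False, so only 'M == m' remains
  if M = m then l
  else printerRot M l.length l

-- ===== PORT B =====
def printer_alt (l : List (List Int)) : List (List Int) :=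
  let heads := l.map (fun x => pvKey x)
  match heads.max? with
  | none => []          -- max() over an empty list raises in Python; outside Pre_
  | some M =>
    match PySem.List.index? heads M with
    | none => []        -- unreachable: M = max heads ∈ heads (Python heads.index(M) cannot raise)
    | some i => l.drop i ++ l.take i

-- ===== PRECONDITION & SPEC =====
-- Pre_ excludes exactly the inputs where Python A raises: empty l (l[0] → IndexError)
-- and an empty inner list (x[0] in the sort key → IndexError)
def Pre_printer (l : List (List Int)) : Prop := l ≠ [] ∧ ∀ x ∈ l, x ≠ []
instance (l : List (List Int)) : Decidable (Pre_printer l) := by unfold Pre_printer; infer_instance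
def pvWitness_printer : List (List Int) := [[1, 5], [3, 6], [2, 7]]

def Spec_printer (l : List (List Int)) (out : List (List Int)) : Prop := out = printer_alt l
instance (l : List (List Int)) (out : List (List Int)) : Decidable (Spec_printer l out) := by unfold Spec_printer; infer_instance

-- ===== CLAIM (what is proved, stated in full; the proofs are below) =====
def Claim_equal_printer : Prop := ∀ (l : List (List Int)), Dom_printer l → Pre_printer l → Spec_printer l (printer l)

-- ===== LEMMAS AND PROOFS =====

-- in a key-sorted list, every key is ≤ the key of the last element
lemma key_le_getLast : ∀ (s : List (List Int)) (h : s ≠ []),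
    s.Pairwise (fun a b => pvKey a ≤ pvKey b) →
    ∀ x ∈ s, pvKey x ≤ pvKey (s.getLast h) := by
  intro s
  induction s with
  | nil => intro h; simp at h
  | cons a t ih =>
    intro _ hp x hx
    rcases List.pairwise_cons.mp hp with ⟨ha, ht⟩
    cases t with
    | nil => simp at hx; simp [hx, List.getLast]
    | cons b u =>
      rw [List.getLast_cons (by simp)]
      rcases List.mem_cons.mp hx with hx | hx
      · exact hx ▸ ha _ (List.getLast_mem _)
      · exact ih (by simp) ht x hx

-- the rotation loop stops at the first index whose key is M and returns the rotated list
lemma rot_eq (M : Int) : ∀ (fuel : Nat) (l : List (List Int)),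
    l.findIdx (fun x => pvKey x == M) < l.length →
    l.findIdx (fun x => pvKey x == M) < fuel →
    printerRot M fuel l =
      l.drop (l.findIdx (fun x => pvKey x == M)) ++ l.take (l.findIdx (fun x => pvKey x == M)) := by
  intro fuel
  induction fuel with
  | zero => intro l _ hf; omega
  | succ n ih =>
    intro l hlen hf
    cases l with
    | nil => simp at hlen
    | cons h t =>
      by_cases hp : pvKey h = M
      · have h0 : (h :: t).findIdx (fun x => pvKey x == M) = 0 := by
          simp [List.findIdx_cons, hp]
        simp [printerRot, h0, PySem.List.pyGetD_zero_cons, hp]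
      · have hpb : (pvKey h == M) = false := by simp [hp]
        have hcons : (h :: t).findIdx (fun x => pvKey x == M) =
            t.findIdx (fun x => pvKey x == M) + 1 := by
          simp [List.findIdx_cons, hpb]
        set j := t.findIdx (fun x => pvKey x == M) with hj
        have hjt : j < t.length := by
          simp [hcons] at hlen; omega
        have hstep : printerRot M (n+1) (h :: t) = printerRot M n (t ++ [h]) := by
          simp only [printerRot, PySem.List.pyGetD_zero_cons, List.tail_cons, List.headD_cons,
            if_pos (by exact fun h' => hp (Eq.symm h'))]
        have happ : (t ++ [h]).findIdx (fun x => pvKey x == M) = j := by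
          rw [List.findIdx_append]
          simp [hjt, ← hj]
        have hih := ih (t ++ [h]) (by rw [happ]; simp; omega) (by rw [happ]; omega)
        rw [hstep, hih, happ, hcons]
        rw [List.drop_append_of_le_length (by omega), List.take_append_of_le_length (by omega)]
        simp [List.drop_succ_cons, List.take_succ_cons, List.append_assoc]

-- A's M (key of the last element of the sorted copy) is the maximum of the keys
lemma max_key (l : List (List Int)) (hne : l ≠ []) :
    (l.map (fun x => pvKey x)).max? =
      some (pvKey ((PySem.List.sorted l (fun x => pvKey x)).getLast
        (by simpa [← List.length_pos_iff_ne_nil, PySem.List.length_sorted] using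
          List.length_pos_iff_ne_nil.mpr hne))) := by
  have hsne : PySem.List.sorted l (fun x => pvKey x) ≠ [] := by
    simpa [← List.length_pos_iff_ne_nil, PySem.List.length_sorted] using
      List.length_pos_iff_ne_nil.mpr hne
  set s := PySem.List.sorted l (fun x => pvKey x) with hs
  have hperm : s.Perm l := PySem.List.sorted_perm l _ _
  rw [List.max?_eq_some_iff]
  constructor
  · exact List.mem_map.mpr ⟨s.getLast hsne, hperm.mem_iff.mp (List.getLast_mem hsne), rfl⟩
  · intro b hb
    rcases List.mem_map.mp hb with ⟨x, hx, rfl⟩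
    exact key_le_getLast s hsne (PySem.List.sorted_pairwise l _) x (hperm.mem_iff.mpr hx)

-- ===== VERDICT (by name: the statement is the Claim_ definition above) =====
-- every key of l is ≥ the key of the head of the sorted copy
lemma head_key_le (l : List (List Int)) (hne : l ≠ []) :
    ∀ x ∈ l, pvKey ((PySem.List.sorted l (fun x => pvKey x)).headD []) ≤ pvKey x := by
  have hsne : PySem.List.sorted l (fun x => pvKey x) ≠ [] := by
    simpa [← List.length_pos_iff_ne_nil, PySem.List.length_sorted] using
      List.length_pos_iff_ne_nil.mpr hne
  set s := PySem.List.sorted l (fun x => pvKey x) with hs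
  have hperm : s.Perm l := PySem.List.sorted_perm l _ _
  intro x hx
  have hxs : x ∈ s := hperm.mem_iff.mpr hx
  cases hse : s with
  | nil => exact absurd hse hsne
  | cons sh st =>
    have hp : List.Pairwise (fun a b => pvKey a ≤ pvKey b) (sh :: st) := by
      rw [← hse, hs]; exact PySem.List.sorted_pairwise l _
    rw [hse] at hxs
    rcases List.pairwise_cons.mp hp with ⟨ha, _⟩
    rcases List.mem_cons.mp hxs with hx' | hx'
    · simp [hx']
    · simpa [hse] using ha x hx'

-- heads.index(M) is the first index of l whose key is M, when one exists
lemma index_eq (l : List (List Int)) (M : Int) (h : ∃ x ∈ l, pvKey x = M) :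
    PySem.List.index? (l.map fun x => pvKey x) M =
      some (l.findIdx (fun x => pvKey x == M)) := by
  unfold PySem.List.index? List.idxOf?
  rw [List.findIdx?_eq_some_iff_findIdx_eq]
  rcases h with ⟨x, hx, hk⟩
  constructor
  · simpa using List.findIdx_lt_length_of_exists
      (p := fun x => pvKey x == M) ⟨x, hx, by simp [hk]⟩
  · rw [List.findIdx_map]; rfl

theorem printer_spec : Claim_equal_printer := by
  intro l _ hpre
  obtain ⟨hne, _⟩ := hpre
  have hsne : PySem.List.sorted l (fun x => pvKey x) ≠ [] := by
    simpa [← List.length_pos_iff_ne_nil, PySem.List.length_sorted] using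
      List.length_pos_iff_ne_nil.mpr hne
  unfold Spec_printer printer printer_alt
  simp only []
  rw [max_key l hne]
  set s := PySem.List.sorted l (fun x => pvKey x) with hs
  set M := pvKey (s.getLast hsne) with hM
  have hmax : ∀ x ∈ l, pvKey x ≤ M := by
    intro x hx
    exact key_le_getLast s hsne (PySem.List.sorted_pairwise l _)
      x ((PySem.List.sorted_perm l _ _).mem_iff.mpr hx)
  have hMmem : ∃ x ∈ l, pvKey x = M :=
    ⟨s.getLast hsne, (PySem.List.sorted_perm l _ _).mem_iff.mp (List.getLast_mem hsne), rfl⟩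
  have e1 : PySem.List.pyGetD s (-1) ([] : List Int) = s.getLast hsne :=
    PySem.List.pyGetD_neg_one s [] hsne
  have e2 : PySem.List.pyGetD s 0 ([] : List Int) = s.headD [] := by
    rw [PySem.List.pyGetD_zero]; cases s <;> simp
  rw [show (PySem.List.sorted l fun x => pvKey x) = s from rfl, e1, e2, ← hM]
  by_cases hMm : M = pvKey (s.headD [])
  · -- all keys equal: the first element already has the max key, B rotates by 0
    rw [if_pos hMm]
    have hidxOf := index_eq l M hMmem
    have h0 : l.findIdx (fun x => pvKey x == M) = 0 := by
      cases hl : l with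
      | nil => exact absurd hl hne
      | cons lh lt =>
        have hkey : pvKey lh = M := by
          have h1 := hmax lh (by rw [hl]; exact List.mem_cons_self)
          have h2 := head_key_le l hne lh (by rw [hl]; exact List.mem_cons_self)
          rw [← hs] at h2; omega
        simp [List.findIdx_cons, hkey]
    rw [h0] at hidxOf
    simp only [hidxOf]
    simp
  · rw [if_neg hMm]
    have hidx : l.findIdx (fun x => pvKey x == M) < l.length := by
      apply List.findIdx_lt_length_of_exists
      rcases hMmem with ⟨x, hx, hk⟩
      exact ⟨x, hx, by simp [hk]⟩
    have hidxOf := index_eq l M hMmem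
    simp only [hidxOf]
    exact rot_eq M l.length l hidx hidx
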